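-- pv_equiv track=rewrite | github.com/ruben-arts/pixi-ros | src/pixi_ros/utils.py | is_valid_ros_package_name
-- ===== SOURCE A (Python) =====
-- def is_valid_ros_package_name(name: str) -> bool:
--     """
--     Check if a package name follows ROS naming conventions.
--
--     ROS package names should:
--     - Only contain lowercase letters, numbers, and underscores
--     - Start with a letter
--     - Not contain consecutive underscores
--
--     Args:
--         name: Package name to validate
--
--     Returns:
--         True if name is valid, False otherwise
--     """
--     if not name:
--         return False
--
--     # Must start with a letter
--     if not name[0].isalpha():
--         return False
--
--     # Check each character
--     for char in name:
--         if not (char.islower() or char.isdigit() or char == "_"):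
--             return False
--
--     # No consecutive underscores
--     if "__" in name:
--         return False
--
--     return True
-- ===== SOURCE B (Python) =====
-- def is_valid_ros_package_name(name: str) -> bool:
--     """Single-pass validation: walk the characters once with a
--     previous-was-underscore flag instead of A's three separate passes."""
--     if not name or not name[0].isalpha():
--         return False
--     prev_underscore = False
--     for char in name:
--         if not (char.islower() or char.isdigit() or char == "_"):
--             return False
--         if char == "_":
--             if prev_underscore:
--                 return False
--             prev_underscore = True
--         else:
--             prev_underscore = False
--     return True
-- ===== Notes on version B (the rewrite author's own statement) =====
-- stated objective: simpler
-- what changed: Replaced A's three separate passes (first-char check, character-class loop, substring search for "__") with a single pass that carries a previous-was-underscore flag, rejecting consecutive underscores inline.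
import Mathlib
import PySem

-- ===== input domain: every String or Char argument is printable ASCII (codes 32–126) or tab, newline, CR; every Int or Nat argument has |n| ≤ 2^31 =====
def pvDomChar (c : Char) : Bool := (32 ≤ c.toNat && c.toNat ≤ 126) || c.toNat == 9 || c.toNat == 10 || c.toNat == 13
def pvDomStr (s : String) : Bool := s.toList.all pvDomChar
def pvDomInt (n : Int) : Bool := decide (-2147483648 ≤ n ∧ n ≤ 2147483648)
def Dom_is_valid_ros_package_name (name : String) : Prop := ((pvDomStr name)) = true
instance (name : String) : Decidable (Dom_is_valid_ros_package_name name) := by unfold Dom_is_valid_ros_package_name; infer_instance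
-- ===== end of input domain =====

-- ===== PORT A =====
-- one honest line: B folds A's three passes (first-char test, class loop, "__" search) into one pass with a flag; equal return value everywhere.
def is_valid_ros_package_name (name : String) : Bool :=
  match name.toList with
  | [] => false
  | c0 :: rest =>
    if !(PySem.Chars.isalpha c0) then false
    else if !((c0 :: rest).all (fun c => PySem.Chars.islower c || PySem.Chars.isdigit c || c == '_')) then false
    else if PySem.Chars.isIn ['_', '_'] (c0 :: rest) then false
    else true

-- ===== PORT B =====
def pvAltLoop : List Char → Bool → Bool
  | [], _ => true
  | c :: rest, prev =>
    if !(PySem.Chars.islower c || PySem.Chars.isdigit c || c == '_') then false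
    else if c == '_' then
      if prev then false else pvAltLoop rest true
    else pvAltLoop rest false

def is_valid_ros_package_name_alt (name : String) : Bool :=
  match name.toList with
  | [] => false
  | c0 :: rest =>
    if !(PySem.Chars.isalpha c0) then false
    else pvAltLoop (c0 :: rest) false

-- ===== PRECONDITION & SPEC =====
def Spec_is_valid_ros_package_name (name : String) (out : Bool) : Prop := out = is_valid_ros_package_name_alt name
instance (name : String) (out : Bool) : Decidable (Spec_is_valid_ros_package_name name out) := by unfold Spec_is_valid_ros_package_name; infer_instance

-- ===== CLAIM (what is proved, stated in full; the proofs are below) =====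
def Claim_equal_is_valid_ros_package_name : Prop := ∀ (name : String), Dom_is_valid_ros_package_name name → Spec_is_valid_ros_package_name name (is_valid_ros_package_name name)

-- ===== LEMMAS AND PROOFS =====

-- no-consecutive-underscore check, in the structural form B's loop maintains
def pvNoDouble : List Char → Bool
  | [] => true
  | [_] => true
  | a :: b :: r => !(a == '_' && b == '_') && pvNoDouble (b :: r)

lemma pvNoDouble_false_iff_infix (cs : List Char) :
    pvNoDouble cs = false ↔ ['_', '_'] <:+: cs := by
  induction cs with
  | nil => simp [pvNoDouble]
  | cons a t ih =>
    cases t with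
    | nil =>
      simp only [pvNoDouble]
      constructor
      · intro h; cases h
      · intro h; have := h.length_le; simp at this
    | cons b r =>
      rw [List.infix_cons_iff, ← ih]
      by_cases ha : a = '_'
      · subst ha
        by_cases hb : b = '_'
        · subst hb
          have hpre : ['_', '_'] <+: '_' :: '_' :: r := ⟨r, rfl⟩
          simp [pvNoDouble, hpre]
        · have hb' : (b == '_') = false := by simp [hb]
          have hnp : ¬ ['_', '_'] <+: '_' :: b :: r := by
            intro hp
            rcases List.cons_prefix_cons.mp hp with ⟨_, h2⟩
            rcases List.cons_prefix_cons.mp h2 with ⟨h3, _⟩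
            exact hb h3.symm
          simp [pvNoDouble, hb', hnp]
      · have ha' : (a == '_') = false := by simp [ha]
        have hnp : ¬ ['_', '_'] <+: a :: b :: r := by
          intro hp
          rcases List.cons_prefix_cons.mp hp with ⟨h1, _⟩
          exact ha h1.symm
        simp [pvNoDouble, ha', hnp]

lemma pvAltLoop_eq (cs : List Char) (prev : Bool) :
    pvAltLoop cs prev =
      (cs.all (fun c => PySem.Chars.islower c || PySem.Chars.isdigit c || c == '_')
        && pvNoDouble cs
        && !(prev && (cs.head? == some '_'))) := by
  induction cs generalizing prev with
  | nil => cases prev <;> simp [pvAltLoop, pvNoDouble]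
  | cons c t ih =>
    by_cases hP : (PySem.Chars.islower c || PySem.Chars.isdigit c || c == '_') = true
    · by_cases hu : c = '_'
      · subst hu
        cases prev with
        | true => simp [pvAltLoop]
        | false =>
          rw [show pvAltLoop ('_' :: t) false = pvAltLoop t true from by
                simp [pvAltLoop],
              ih]
          cases t with
          | nil => simp [pvNoDouble]
          | cons b r =>
            by_cases hb : b = '_' <;>
              simp [pvNoDouble, hb, Bool.and_comm, Bool.and_assoc]
      · have hu' : (c == '_') = false := by simp [hu]
        have hcd : (PySem.Chars.islower c || PySem.Chars.isdigit c) = true := by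
          simpa [hu'] using hP
        rw [show pvAltLoop (c :: t) prev = pvAltLoop t false from by
              simp [pvAltLoop, hcd, hu'],
            ih]
        cases t with
        | nil => simp [pvNoDouble, hcd, hu']
        | cons b r =>
          simp [pvNoDouble, hcd, hu', Bool.and_comm]
    · have hP' : (PySem.Chars.islower c || PySem.Chars.isdigit c || c == '_') = false := by
        simpa using hP
      simp [pvAltLoop, hP']

lemma pvKey (cs : List Char) :
    (if !(cs.all (fun c => PySem.Chars.islower c || PySem.Chars.isdigit c || c == '_')) then false
     else if PySem.Chars.isIn ['_', '_'] cs then false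
     else true) = pvAltLoop cs false := by
  rw [pvAltLoop_eq]
  by_cases hall : cs.all (fun c => PySem.Chars.islower c || PySem.Chars.isdigit c || c == '_') = true
  · by_cases hin : PySem.Chars.isIn ['_', '_'] cs = true
    · have hnd : pvNoDouble cs = false :=
        (pvNoDouble_false_iff_infix cs).2 ((PySem.Chars.isIn_iff_infix _ _).1 hin)
      simp [hall, hin, hnd]
    · have hnd : pvNoDouble cs = true := by
        cases hcase : pvNoDouble cs
        · exact absurd ((PySem.Chars.isIn_iff_infix _ _).2
            ((pvNoDouble_false_iff_infix cs).1 hcase)) hin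
        · rfl
      have hin' : PySem.Chars.isIn ['_', '_'] cs = false := by simpa using hin
      simp [hall, hin', hnd]
  · have hall' : cs.all (fun c => PySem.Chars.islower c || PySem.Chars.isdigit c || c == '_') = false := by
      simpa using hall
    simp [hall']

-- ===== VERDICT (by name: the statement is the Claim_ definition above) =====
theorem is_valid_ros_package_name_spec : Claim_equal_is_valid_ros_package_name := by
  intro name _
  unfold Spec_is_valid_ros_package_name is_valid_ros_package_name is_valid_ros_package_name_alt
  cases h : name.toList with
  | nil => rfl
  | cons c0 rest =>
    dsimp only
    by_cases ha : (!PySem.Chars.isalpha c0) = true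
    · rw [if_pos ha, if_pos ha]
    · rw [if_neg ha, if_neg ha]
      exact pvKey (c0 :: rest)
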